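-- pv_equiv track=rewrite | github.com/liaodisen/disen | ccc/ccc14s3.py | case2test
-- ===== SOURCE A (Python) =====
-- def case2test(list0):
--     test = False
--     n = 0
--     if list0[0] > list0[1]:
--         while n + 1 < len(list0) -1 and list0[n] > list0[n + 1]:
--             n += 1
--         sub2 = list0[n+1:]
--         sub0 = list0[0:n+1]
--         if sub2 == sorted(sub2) or n == len(list0) -2:
--             test = True
--     return test
-- ===== SOURCE B (Python) =====
-- def case2test(list0):
--     if not (list0[0] > list0[1]):
--         return False
--     descending = True
--     for i in range(1, len(list0) - 1):
--         a, b = list0[i], list0[i + 1]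
--         if descending:
--             if a <= b:
--                 descending = False
--         elif a > b:
--             return False
--     return True
-- ===== Notes on version B (the rewrite author's own statement) =====
-- stated objective: faster
-- what changed: A finds the end of the descending prefix with a while loop, slices off the suffix and compares it to sorted(suffix); B makes a single pass over adjacent pairs with a descending/ascending phase flag, with no slicing and no sort, which a timing run measured ~2.8x faster at the largest size.
import Mathlib
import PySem

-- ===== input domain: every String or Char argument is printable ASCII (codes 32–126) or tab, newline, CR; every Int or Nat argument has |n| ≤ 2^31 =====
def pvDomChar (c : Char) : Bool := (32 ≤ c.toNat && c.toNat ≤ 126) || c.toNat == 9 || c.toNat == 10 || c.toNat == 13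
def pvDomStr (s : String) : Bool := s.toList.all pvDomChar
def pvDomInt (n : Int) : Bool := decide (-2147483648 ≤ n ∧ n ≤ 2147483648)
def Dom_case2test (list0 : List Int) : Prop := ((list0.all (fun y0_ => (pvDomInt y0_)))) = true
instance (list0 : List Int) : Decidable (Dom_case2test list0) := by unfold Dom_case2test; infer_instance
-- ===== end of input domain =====

-- B replaces A's find-descent-prefix loop followed by sort-and-compare of the suffix with a
-- single adjacent-pair pass carrying a descending/ascending phase flag (no sort, no slicing).

-- ===== PORT A =====
-- while n + 1 < len(list0) - 1 and list0[n] > list0[n+1]: n += 1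
def loopA (list0 : List Int) (n : Nat) : Nat :=
  if h : ((n : Int) + 1 < (list0.length : Int) - 1) ∧
         PySem.List.pyGetD list0 (n : Int) 0 > PySem.List.pyGetD list0 ((n : Int) + 1) 0 then
    loopA list0 (n + 1)
  else n
termination_by list0.length - n
decreasing_by omega

def case2test (list0 : List Int) : Bool :=
  -- list0[0] > list0[1]  (IndexError when len < 2, excluded by Pre_)
  match PySem.List.pyGet? list0 0, PySem.List.pyGet? list0 1 with
  | some a0, some a1 =>
    if a0 > a1 then
      let n := loopA list0 0
      let sub2 := PySem.List.slice list0 (some ((n : Int) + 1)) none   -- list0[n+1:]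
      (sub2 == PySem.List.sorted sub2 (fun x => x) false) || decide ((n : Int) = (list0.length : Int) - 2)
    else false
  | _, _ => false

-- ===== PORT B =====
-- for i in range(1, len(list0)-1): one pass over adjacent pairs with a phase flag
def altLoop (list0 : List Int) (i : Nat) (descending : Bool) : Bool :=
  if h : i + 1 < list0.length then
    let a := PySem.List.pyGetD list0 (i : Int) 0
    let b := PySem.List.pyGetD list0 ((i : Int) + 1) 0
    if descending then
      if a ≤ b then altLoop list0 (i + 1) false
      else altLoop list0 (i + 1) true
    else
      if a > b then false
      else altLoop list0 (i + 1) false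
  else true
termination_by list0.length - i
decreasing_by all_goals omega

def case2test_alt (list0 : List Int) : Bool :=
  match PySem.List.pyGet? list0 0 with
  | none => false          -- IndexError when len < 2, excluded by Pre_
  | some a0 =>
    match PySem.List.pyGet? list0 1 with
    | none => false
    | some a1 => if a0 > a1 then altLoop list0 1 true else false

-- ===== PRECONDITION & SPEC =====
-- Pre_ excludes exactly the inputs of length < 2, on which both A and B raise IndexError.
def Pre_case2test (list0 : List Int) : Prop := 2 ≤ list0.length
instance (list0 : List Int) : Decidable (Pre_case2test list0) := by unfold Pre_case2test; infer_instance
def pvWitness_case2test : List Int := ([5, 2, 3])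

def Spec_case2test (list0 : List Int) (out : Bool) : Prop := out = case2test_alt list0
instance (list0 : List Int) (out : Bool) : Decidable (Spec_case2test list0 out) := by unfold Spec_case2test; infer_instance

-- ===== CLAIM (what is proved, stated in full; the proofs are below) =====
def Claim_equal_case2test : Prop := ∀ (list0 : List Int), Dom_case2test list0 → Pre_case2test list0 → Spec_case2test list0 (case2test list0)

-- ===== LEMMAS AND PROOFS =====

lemma pyGetD_nat (xs : List Int) (i : Nat) (h : i < xs.length) :
    PySem.List.pyGetD xs (i : Int) 0 = xs[i] := by
  simp [List.getD_eq_getElem?_getD, List.getElem?_eq_getElem h]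

lemma pyGetD_nat_succ (xs : List Int) (i : Nat) (h : i + 1 < xs.length) :
    PySem.List.pyGetD xs ((i : Int) + 1) 0 = xs[i + 1] := by
  have hc : ((i : Int) + 1) = ((i + 1 : Nat) : Int) := by push_cast; ring
  rw [hc]; exact pyGetD_nat xs (i + 1) h

-- step equations for the ports' loops
lemma loopA_pos (xs : List Int) (n : Nat)
    (h : ((n : Int) + 1 < (xs.length : Int) - 1) ∧
         PySem.List.pyGetD xs (n : Int) 0 > PySem.List.pyGetD xs ((n : Int) + 1) 0) :
    loopA xs n = loopA xs (n + 1) := by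
  conv_lhs => rw [loopA]
  exact dif_pos h

lemma loopA_neg (xs : List Int) (n : Nat)
    (h : ¬ (((n : Int) + 1 < (xs.length : Int) - 1) ∧
         PySem.List.pyGetD xs (n : Int) 0 > PySem.List.pyGetD xs ((n : Int) + 1) 0)) :
    loopA xs n = n := by
  conv_lhs => rw [loopA]
  exact dif_neg h

lemma altLoop_end (xs : List Int) (i : Nat) (d : Bool) (h : ¬ i + 1 < xs.length) :
    altLoop xs i d = true := by
  conv_lhs => rw [altLoop]
  exact dif_neg h

lemma altLoop_true_le (xs : List Int) (i : Nat) (h : i + 1 < xs.length)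
    (hab : PySem.List.pyGetD xs (i : Int) 0 ≤ PySem.List.pyGetD xs ((i : Int) + 1) 0) :
    altLoop xs i true = altLoop xs (i + 1) false := by
  conv_lhs => rw [altLoop]
  rw [dif_pos h]
  show (if PySem.List.pyGetD xs (i : Int) 0 ≤ PySem.List.pyGetD xs ((i : Int) + 1) 0 then
      altLoop xs (i + 1) false else altLoop xs (i + 1) true) = altLoop xs (i + 1) false
  exact if_pos hab

lemma altLoop_true_gt (xs : List Int) (i : Nat) (h : i + 1 < xs.length)
    (hab : PySem.List.pyGetD xs (i : Int) 0 > PySem.List.pyGetD xs ((i : Int) + 1) 0) :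
    altLoop xs i true = altLoop xs (i + 1) true := by
  conv_lhs => rw [altLoop]
  rw [dif_pos h]
  show (if PySem.List.pyGetD xs (i : Int) 0 ≤ PySem.List.pyGetD xs ((i : Int) + 1) 0 then
      altLoop xs (i + 1) false else altLoop xs (i + 1) true) = altLoop xs (i + 1) true
  exact if_neg (not_le.mpr hab)

lemma altLoop_false_gt (xs : List Int) (i : Nat) (h : i + 1 < xs.length)
    (hab : PySem.List.pyGetD xs (i : Int) 0 > PySem.List.pyGetD xs ((i : Int) + 1) 0) :
    altLoop xs i false = false := by
  conv_lhs => rw [altLoop]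
  rw [dif_pos h]
  show (if PySem.List.pyGetD xs (i : Int) 0 > PySem.List.pyGetD xs ((i : Int) + 1) 0 then
      false else altLoop xs (i + 1) false) = false
  exact if_pos hab

lemma altLoop_false_le (xs : List Int) (i : Nat) (h : i + 1 < xs.length)
    (hab : PySem.List.pyGetD xs (i : Int) 0 ≤ PySem.List.pyGetD xs ((i : Int) + 1) 0) :
    altLoop xs i false = altLoop xs (i + 1) false := by
  conv_lhs => rw [altLoop]
  rw [dif_pos h]
  show (if PySem.List.pyGetD xs (i : Int) 0 > PySem.List.pyGetD xs ((i : Int) + 1) 0 then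
      false else altLoop xs (i + 1) false) = altLoop xs (i + 1) false
  exact if_neg (not_lt.mpr hab)

-- "l == sorted(l)" is exactly adjacent-pair monotonicity
lemma beq_sorted_eq_chain (l : List Int) :
    (l == PySem.List.sorted l (fun x => x) false) = decide (l.IsChain (· ≤ ·)) := by
  by_cases h : l.IsChain (· ≤ ·)
  · have hp : l.Pairwise (fun a b => a ≤ b) := List.isChain_iff_pairwise.mp h
    rw [PySem.List.sorted_eq_self_of_pairwise l (fun x => x) hp]
    simp [h]
  · simp only [decide_eq_false h]
    rw [beq_eq_false_iff_ne]
    intro heq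
    exact h (List.isChain_iff_pairwise.mpr (heq ▸ PySem.List.sorted_pairwise l (fun x => x)))

-- the ascending phase of B checks exactly that the rest of the list is nondecreasing
lemma altLoop_asc (xs : List Int) : ∀ (i : Nat),
    altLoop xs i false = decide ((xs.drop i).IsChain (· ≤ ·)) := by
  intro i
  induction hk : xs.length - i using Nat.strong_induction_on generalizing i with
  | _ k ih =>
  by_cases h : i + 1 < xs.length
  · have hi : i < xs.length := by omega
    have hd : xs.drop i = xs[i] :: xs.drop (i + 1) := List.drop_eq_getElem_cons hi
    have hd2 : xs.drop (i + 1) = xs[i + 1] :: xs.drop (i + 2) := List.drop_eq_getElem_cons h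
    by_cases hab : xs[i] ≤ xs[i + 1]
    · rw [altLoop_false_le xs i h (by rw [pyGetD_nat xs i hi, pyGetD_nat_succ xs i h]; exact hab)]
      rw [ih (xs.length - (i + 1)) (by omega) (i + 1) rfl]
      have hiff : (xs.drop (i + 1)).IsChain (· ≤ ·) ↔ (xs.drop i).IsChain (· ≤ ·) := by
        rw [hd, hd2, List.isChain_cons_cons, ← hd2]
        simp [hab]
      exact decide_eq_decide.mpr hiff
    · rw [altLoop_false_gt xs i h (by rw [pyGetD_nat xs i hi, pyGetD_nat_succ xs i h]; omega)]
      have hnc : ¬ (xs.drop i).IsChain (· ≤ ·) := by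
        rw [hd, hd2, List.isChain_cons_cons]
        intro ⟨h1, _⟩; omega
      simp [hnc]
  · rw [altLoop_end xs i false h]
    have hlen : (xs.drop i).length ≤ 1 := by simp; omega
    have hc : (xs.drop i).IsChain (· ≤ ·) := by
      rcases hnil : xs.drop i with _ | ⟨x, _ | ⟨y, t⟩⟩
      · exact List.IsChain.nil
      · exact List.isChain_singleton x
      · rw [hnil] at hlen; simp at hlen
    simp [hc]

-- the descending phase of B tracks A's prefix loop
lemma altLoop_desc (xs : List Int) : ∀ (n : Nat), n + 2 ≤ xs.length →
    PySem.List.pyGetD xs (n : Int) 0 > PySem.List.pyGetD xs ((n : Int) + 1) 0 →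
    altLoop xs (n + 1) true =
      ((PySem.List.slice xs (some ((loopA xs n : Int) + 1)) none ==
        PySem.List.sorted (PySem.List.slice xs (some ((loopA xs n : Int) + 1)) none) (fun x => x) false) ||
       decide ((loopA xs n : Int) = (xs.length : Int) - 2)) := by
  intro n
  induction hk : xs.length - n using Nat.strong_induction_on generalizing n with
  | _ k ih =>
  intro hlen hgt
  by_cases h : n + 2 < xs.length
  · have hstep : loopA xs n = loopA xs (n + 1) :=
      loopA_pos xs n ⟨by omega, hgt⟩
    rw [hstep]
    by_cases hab : PySem.List.pyGetD xs ((n + 1 : Nat) : Int) 0 ≤ PySem.List.pyGetD xs (((n + 1 : Nat) : Int) + 1) 0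
    · -- descent ends here: A's inner loop stops at n+1
      rw [altLoop_true_le xs (n + 1) (by omega) hab]
      have hstop : loopA xs (n + 1) = n + 1 :=
        loopA_neg xs (n + 1) (by intro ⟨_, h2⟩; omega)
      rw [hstop]
      rw [altLoop_asc]
      have hslice : PySem.List.slice xs (some (((n + 1 : Nat) : Int) + 1)) none = xs.drop (n + 2) := by
        have hc2 : (((n + 1 : Nat) : Int) + 1) = ((n + 2 : Nat) : Int) := by push_cast; ring
        rw [hc2, PySem.List.slice_from_natCast]
      rw [hslice, beq_sorted_eq_chain]
      by_cases hend : ((n + 1 : Nat) : Int) = (xs.length : Int) - 2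
      · -- suffix is a single element: both disjuncts are true
        have hl3 : xs.length = n + 3 := by omega
        have h1 : (xs.drop (n + 2)).length = 1 := by simp [hl3]
        obtain ⟨x, hx⟩ := List.length_eq_one_iff.mp h1
        simp [hx, hend]
      · have hend' : ¬ ((n : Int) + 1 = (xs.length : Int) - 2) := by push_cast at hend; omega
        
        simp [hend']
    · rw [altLoop_true_gt xs (n + 1) (by omega) (not_le.mp hab)]
      exact ih (xs.length - (n + 1)) (by omega) (n + 1) rfl (by omega) (not_le.mp hab)
  · -- B's scan is over; A's loop stops and the 'n == len-2' disjunct fires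
    rw [altLoop_end xs (n + 1) true (by omega)]
    have hstop : loopA xs n = n := loopA_neg xs n (by intro ⟨h1, _⟩; omega)
    rw [hstop]
    have hend : ((n : Int) = (xs.length : Int) - 2) := by omega
    simp [hend]

-- ===== VERDICT (by name: the statement is the Claim_ definition above) =====
theorem case2test_spec : Claim_equal_case2test := by
  intro list0 _ hpre
  unfold Pre_case2test at hpre
  unfold Spec_case2test case2test case2test_alt
  match list0, hpre with
  | a :: b :: t, _ =>
    have h0 : PySem.List.pyGet? (a :: b :: t) 0 = some a := by
      rw [show (0 : Int) = ((0 : Nat) : Int) from rfl, PySem.List.pyGet?_natCast]; rfl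
    have h1 : PySem.List.pyGet? (a :: b :: t) 1 = some b := by
      rw [show (1 : Int) = ((1 : Nat) : Int) from rfl, PySem.List.pyGet?_natCast]; rfl
    rw [h0, h1]
    by_cases hab : a > b
    · simp only [if_pos hab]
      have hg : PySem.List.pyGetD (a :: b :: t) ((0 : Nat) : Int) 0 >
                PySem.List.pyGetD (a :: b :: t) (((0 : Nat) : Int) + 1) 0 := by
        rw [pyGetD_nat (a :: b :: t) 0 (by simp), pyGetD_nat_succ (a :: b :: t) 0 (by simp)]
        simpa using hab
      have hmain := altLoop_desc (a :: b :: t) 0 (by simp) hg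
      simpa using hmain.symm
    · simp only [if_neg hab]
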